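-- pv_equiv track=rewrite | github.com/daminduLiyanage/uption | PermAlgorithm.py | get_unused_char_at_pos
-- ===== SOURCE A (Python) =====
-- def get_unused_char_at_pos(alphabet, pos, used):
--     # --------------------------------------------------------------------
--     count = -1
--     for each in range(0, len(alphabet)):
--         if not used[each]:
--             count = count + 1
--             if count == pos:
--                 used[each] = True
--                 return alphabet[each]
--     return " "
-- ===== SOURCE B (Python) =====
-- def get_unused_char_at_pos(alphabet, pos, used):
--     flags = used[:len(alphabet)]
--     # prefix[j] = number of unused slots among the first j flags
--     prefix = [0]
--     for u in flags:
--         prefix.append(prefix[-1] + (0 if u else 1))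
--     if pos < 0 or prefix[-1] <= pos:
--         return " "
--     # binary search for the smallest index j with prefix[j + 1] > pos;
--     # that j is exactly the position of the pos-th unused slot
--     lo, hi = 0, len(flags) - 1
--     while lo < hi:
--         mid = (lo + hi) // 2
--         if prefix[mid + 1] <= pos:
--             lo = mid + 1
--         else:
--             hi = mid
--     used[lo] = True
--     return alphabet[lo]
-- ===== Notes on version B (the rewrite author's own statement) =====
-- stated objective: alternative
-- what changed: B builds a prefix-count table of unused slots over used[:len(alphabet)] and binary-searches it for the smallest index whose prefix count exceeds pos, instead of A's counting scan with early return; same O(n) cost dominated by the table build.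
import Mathlib
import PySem

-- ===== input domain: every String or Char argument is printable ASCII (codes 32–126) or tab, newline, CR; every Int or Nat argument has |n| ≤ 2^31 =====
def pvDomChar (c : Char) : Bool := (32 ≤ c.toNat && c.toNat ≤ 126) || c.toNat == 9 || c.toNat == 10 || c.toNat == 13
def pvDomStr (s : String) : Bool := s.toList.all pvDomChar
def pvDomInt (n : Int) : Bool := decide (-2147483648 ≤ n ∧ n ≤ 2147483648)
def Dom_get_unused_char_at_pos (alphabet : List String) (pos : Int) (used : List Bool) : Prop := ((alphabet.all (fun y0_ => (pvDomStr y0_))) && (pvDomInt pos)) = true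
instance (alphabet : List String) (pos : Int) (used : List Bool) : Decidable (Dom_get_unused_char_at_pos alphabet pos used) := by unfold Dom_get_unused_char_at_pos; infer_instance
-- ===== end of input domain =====

-- B computes a prefix-count table of unused slots and binary-searches it for the pos-th
-- unused index instead of A's counting scan (objective: alternative).
-- Both Pythons mutate `used` at the found index; B performs the same mutation, and the
-- theorems here are about the return value.

-- ===== PORT A =====
-- A's for-loop over range(0, len(alphabet)) with early return; "!" marks the IndexError
-- branch (used[each] out of range), which Pre_ excludes.
def goA (alphabet : List String) (used : List Bool) (pos : Int) : List Int → Int → String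
  | [], _ => " "
  | each :: rest, count =>
    match PySem.List.pyGet? used each with
    | none => "!"
    | some u =>
      if u = false then
        let count' := count + 1
        if count' = pos then (PySem.List.pyGet? alphabet each).getD "!"
        else goA alphabet used pos rest count'
      else goA alphabet used pos rest count

def get_unused_char_at_pos (alphabet : List String) (pos : Int) (used : List Bool) : String :=
  goA alphabet used pos (PySem.List.pyRange 0 (alphabet.length : Int) 1) (-1)

-- ===== PORT B =====
-- one step of "prefix.append(prefix[-1] + (0 if u else 1))"; the accumulator is never
-- empty along the fold, so the .getD 0 default of prefix[-1] is never consulted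
def prefStep (acc : List Int) (u : Bool) : List Int :=
  acc ++ [(PySem.List.pyGet? acc (-1)).getD 0 + (if u then 0 else 1)]

-- the while-loop: binary search for the smallest j with prefix[j+1] > pos
def bsearchB (pref : List Int) (pos lo hi : Int) : Int :=
  if h : lo < hi then
    let mid := PySem.Int.floordiv (lo + hi) 2
    if (PySem.List.pyGet? pref (mid + 1)).getD 0 ≤ pos then bsearchB pref pos (mid + 1) hi
    else bsearchB pref pos lo mid
  else lo
termination_by (hi - lo).toNat
decreasing_by
  · have hm := PySem.Int.floordiv_two_mid_bounds (le_of_lt h)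
    omega
  · have hm := PySem.Int.floordiv_two_mid_bounds (le_of_lt h)
    have hlt : PySem.Int.floordiv (lo + hi) 2 < hi := by
      rw [PySem.Int.floordiv_lt_iff_lt_mul (by omega)]; omega
    omega

def get_unused_char_at_pos_alt (alphabet : List String) (pos : Int) (used : List Bool) : String :=
  let flags := PySem.List.slice used none (some (alphabet.length : Int))
  let pref := flags.foldl prefStep [(0 : Int)]
  if pos < 0 ∨ (PySem.List.pyGet? pref (-1)).getD 0 ≤ pos then " "
  else
    let lo := bsearchB pref pos 0 ((flags.length : Int) - 1)
    (PySem.List.pyGet? alphabet lo).getD "!"   -- lo is a valid alphabet index by the search invariant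

-- ===== PRECONDITION & SPEC =====
-- Pre_ excludes exactly the inputs where A raises IndexError: used shorter than alphabet
-- and the pos-th unused slot not found within used.
def Pre_get_unused_char_at_pos (alphabet : List String) (pos : Int) (used : List Bool) : Prop :=
  alphabet.length ≤ used.length ∨ (0 ≤ pos ∧ pos < (used.countP (fun b => !b) : Int))
instance (alphabet : List String) (pos : Int) (used : List Bool) : Decidable (Pre_get_unused_char_at_pos alphabet pos used) := by unfold Pre_get_unused_char_at_pos; infer_instance

def pvWitness_get_unused_char_at_pos : List String × Int × List Bool := (["a", "b", "c"], 1, [false, true, false])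

def Spec_get_unused_char_at_pos (alphabet : List String) (pos : Int) (used : List Bool) (out : String) : Prop := out = get_unused_char_at_pos_alt alphabet pos used
instance (alphabet : List String) (pos : Int) (used : List Bool) (out : String) : Decidable (Spec_get_unused_char_at_pos alphabet pos used out) := by unfold Spec_get_unused_char_at_pos; infer_instance

-- ===== CLAIM (what is proved, stated in full; the proofs are below) =====
def Claim_equal_get_unused_char_at_pos : Prop := ∀ (alphabet : List String) (pos : Int) (used : List Bool), Dom_get_unused_char_at_pos alphabet pos used → Pre_get_unused_char_at_pos alphabet pos used → Spec_get_unused_char_at_pos alphabet pos used (get_unused_char_at_pos alphabet pos used)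


-- ===== LEMMAS AND PROOFS =====

-- Abstraction of A's loop over the zipped (alphabet, used) pairs; d is what the loop
-- produces once the pairs run out (" " if the range is exhausted, "!" if used ran short).
def goZ (pos : Int) (d : String) : List (String × Bool) → Int → String
  | [], _ => d
  | (a, u) :: rest, c =>
    if u = false then
      if c + 1 = pos then a else goZ pos d rest (c + 1)
    else goZ pos d rest c

def unusedOf (l : List (String × Bool)) : List String :=
  (l.filter (fun p => !p.2)).map (fun p => p.1)

-- count of unused among the first j flags, as an Int
def cntU (flags : List Bool) (j : Nat) : Int := ((flags.take j).countP (fun b => !b) : Int)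

-- A's indexed loop equals the zip-based loop goZ.
lemma goA_eq_goZ (al : List String) (us : List Bool) (pos : Int) :
    ∀ (k s : Nat) (c : Int), al.length ≤ s + k → s ≤ us.length →
      goA al us pos (PySem.List.pyRange (s : Int) (al.length : Int) 1) c
        = goZ pos (if al.length ≤ us.length then " " else "!") ((al.drop s).zip (us.drop s)) c := by
  intro k
  induction k with
  | zero =>
    intro s c h1 h2
    rw [PySem.List.pyRange_one_eq_nil (by exact_mod_cast (by omega : al.length ≤ s))]
    rw [List.drop_eq_nil_of_le (by omega)]
    simp [goA, goZ, if_pos (by omega : al.length ≤ us.length)]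
  | succ k ih =>
    intro s c h1 h2
    by_cases hs : s < al.length
    · rw [PySem.List.pyRange_one_cons (by exact_mod_cast hs)]
      by_cases hsm : s < us.length
      · rw [List.drop_eq_getElem_cons hs, List.drop_eq_getElem_cons hsm]
        simp only [goA, List.zip_cons_cons, goZ, PySem.List.pyGet?_natCast,
          List.getElem?_eq_getElem hsm]
        have hget : PySem.List.pyGet? al (s : Int) = some al[s] := by
          simp [PySem.List.pyGet?_natCast, List.getElem?_eq_getElem hs]
        have hrec : ∀ c' : Int, goA al us pos (PySem.List.pyRange ((s : Int) + 1) (al.length : Int) 1) c'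
            = goZ pos (if al.length ≤ us.length then " " else "!")
              ((al.drop (s + 1)).zip (us.drop (s + 1))) c' := by
          intro c'
          have hcast : ((s : Int) + 1) = ((s + 1 : Nat) : Int) := by push_cast; ring
          rw [hcast]
          exact ih (s + 1) c' (by omega) (by omega)
        cases hu : us[s] with
        | false => simp [hrec, List.getElem?_eq_getElem hs]
        | true => exact hrec c
      · have hse : s = us.length := by omega
        have hnone : PySem.List.pyGet? us (s : Int) = none := by
          rw [PySem.List.pyGet?_natCast, List.getElem?_eq_none]; omega
        rw [List.drop_eq_nil_of_le (by omega : us.length ≤ s)]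
        simp [goA, hnone, goZ, List.zip_nil_right, if_neg (by omega : ¬ al.length ≤ us.length)]
    · rw [PySem.List.pyRange_one_eq_nil (by exact_mod_cast (by omega : al.length ≤ s))]
      rw [List.drop_eq_nil_of_le (by omega : al.length ≤ s)]
      simp [goA, goZ, if_pos (by omega : al.length ≤ us.length)]

-- goZ returns the (pos - c - 1)-th unused entry, or d.
lemma goZ_eq (pos : Int) (d : String) :
    ∀ (l : List (String × Bool)) (c : Int),
      goZ pos d l c = if c < pos then ((unusedOf l)[(pos - c - 1).toNat]?).getD d else d := by
  intro l
  induction l with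
  | nil => intro c; simp [goZ, unusedOf]
  | cons p rest ih =>
    obtain ⟨a, u⟩ := p
    intro c
    cases u with
    | true => simpa [goZ, unusedOf] using ih c
    | false =>
      by_cases hc : c + 1 = pos
      · simp [goZ, hc, unusedOf, if_pos (by omega : c < pos),
          (by omega : (pos - c - 1).toNat = 0)]
      · by_cases hlt : c < pos
        · have h1 : c + 1 < pos := by omega
          have h2 : (pos - c - 1).toNat = (pos - (c + 1) - 1).toNat + 1 := by omega
          rw [show goZ pos d ((a, false) :: rest) c = goZ pos d rest (c + 1) by
            simp [goZ, hc]]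
          rw [ih (c + 1), if_pos h1, if_pos hlt]
          simp [unusedOf, h2]
        · simp [goZ, hc, ih (c + 1), if_neg hlt, if_neg (by omega : ¬ c + 1 < pos)]

-- the fold building prefix produces exactly the prefix-count table
lemma foldl_prefStep (flags : List Bool) :
    ∀ (acc : List Int) (c0 : Int), PySem.List.pyGet? acc (-1) = some c0 →
      flags.foldl prefStep acc
        = acc ++ (List.range flags.length).map
            (fun j => c0 + (((flags.take (j + 1)).countP (fun b => !b) : Nat) : Int)) := by
  induction flags with
  | nil => intro acc c0 _; simp
  | cons u fs ih =>
    intro acc c0 hlast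
    have hstep : prefStep acc u = acc ++ [c0 + (if u then 0 else 1)] := by
      simp [prefStep, hlast]
    have hlast' : PySem.List.pyGet? (acc ++ [c0 + (if u then 0 else 1)]) (-1)
        = some (c0 + (if u then 0 else 1)) :=
      PySem.List.pyGet?_neg_one_append_singleton acc _
    rw [List.foldl_cons, hstep, ih _ _ hlast']
    rw [List.length_cons, List.range_succ_eq_map, List.map_cons, List.map_map,
      List.append_assoc, List.singleton_append]
    congr 1
    congr 1
    · cases u <;> simp [List.countP_cons]
    · apply List.map_congr_left
      intro j _
      simp only [Function.comp]
      have : (u :: fs).take (j + 1 + 1) = u :: fs.take (j + 1) := rfl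
      rw [this, List.countP_cons]
      cases u <;> simp <;> push_cast <;> ring

lemma prefix_eq (flags : List Bool) :
    flags.foldl prefStep [(0 : Int)]
      = (List.range (flags.length + 1)).map (fun j => cntU flags j) := by
  rw [foldl_prefStep flags [0] 0 (by simp [PySem.List.pyGet?_neg_one])]
  rw [List.range_succ_eq_map, List.map_cons, List.map_map]
  simp only [cntU, List.take_zero, List.countP_nil, Nat.cast_zero, List.singleton_append]
  congr 1
  apply List.map_congr_left
  intro j _
  simp [Function.comp]

lemma pref_get (flags : List Bool) (j : Nat) (hj : j ≤ flags.length) :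
    PySem.List.pyGet? (flags.foldl prefStep [(0 : Int)]) (j : Int) = some (cntU flags j) := by
  rw [prefix_eq, PySem.List.pyGet?_natCast]
  rw [List.getElem?_map, List.getElem?_range (by omega)]
  rfl

lemma pref_last (flags : List Bool) :
    PySem.List.pyGet? (flags.foldl prefStep [(0 : Int)]) (-1) = some (cntU flags flags.length) := by
  rw [prefix_eq, List.range_succ, List.map_append]
  simpa using PySem.List.pyGet?_neg_one_append_singleton

-- cntU is monotone step-by-step
lemma cntU_succ (flags : List Bool) (j : Nat) (hj : j < flags.length) :
    cntU flags (j + 1) = cntU flags j + (if flags[j] then 0 else 1) := by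
  unfold cntU
  rw [List.take_succ, List.getElem?_eq_getElem hj]
  cases h : flags[j] <;> simp [List.countP_append, h]

lemma bsearch_spec (flags : List Bool) (pos : Int) :
    ∀ (fuel : Nat) (lo hi : Int), (hi - lo).toNat ≤ fuel → 0 ≤ lo → lo ≤ hi →
      hi < (flags.length : Int) →
      cntU flags lo.toNat ≤ pos → pos < cntU flags (hi.toNat + 1) →
      0 ≤ bsearchB (flags.foldl prefStep [(0 : Int)]) pos lo hi ∧
      bsearchB (flags.foldl prefStep [(0 : Int)]) pos lo hi ≤ hi ∧
      cntU flags (bsearchB (flags.foldl prefStep [(0 : Int)]) pos lo hi).toNat ≤ pos ∧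
      pos < cntU flags ((bsearchB (flags.foldl prefStep [(0 : Int)]) pos lo hi).toNat + 1) := by
  intro fuel
  induction fuel with
  | zero =>
    intro lo hi hfuel h0 hle hn hlo hhi
    have : lo = hi := by omega
    subst this
    rw [bsearchB, dif_neg (by omega)]
    exact ⟨h0, le_refl _, hlo, hhi⟩
  | succ fuel ih =>
    intro lo hi hfuel h0 hle hn hlo hhi
    by_cases h : lo < hi
    · have hm := PySem.Int.floordiv_two_mid_bounds (le_of_lt h)
      have hmlt : PySem.Int.floordiv (lo + hi) 2 < hi := by
        rw [PySem.Int.floordiv_lt_iff_lt_mul (by omega)]; omega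
      have hget : PySem.List.pyGet? (flags.foldl prefStep [(0 : Int)])
          (PySem.Int.floordiv (lo + hi) 2 + 1)
          = some (cntU flags ((PySem.Int.floordiv (lo + hi) 2).toNat + 1)) := by
        rw [show (PySem.Int.floordiv (lo + hi) 2 + 1)
            = (((PySem.Int.floordiv (lo + hi) 2).toNat + 1 : Nat) : Int) by omega]
        exact pref_get flags _ (by omega)
      rw [bsearchB, dif_pos h]
      simp only [hget, Option.getD_some]
      by_cases hb : cntU flags ((PySem.Int.floordiv (lo + hi) 2).toNat + 1) ≤ pos
      · rw [if_pos hb]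
        exact ih (PySem.Int.floordiv (lo + hi) 2 + 1) hi (by omega) (by omega) (by omega) hn
          (by rwa [show (PySem.Int.floordiv (lo + hi) 2 + 1).toNat
              = (PySem.Int.floordiv (lo + hi) 2).toNat + 1 by omega]) hhi
      · rw [if_neg hb]
        obtain ⟨c1, c2, c3, c4⟩ := ih lo (PySem.Int.floordiv (lo + hi) 2) (by omega) h0
          (by omega) (by omega) hlo (by omega)
        exact ⟨c1, by omega, c3, c4⟩
    · rw [bsearchB, dif_neg h]
      have : lo = hi := by omega
      subst this
      exact ⟨h0, le_refl _, hlo, hhi⟩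

-- the pos-th element of the unused list is the entry at the first index whose prefix
-- count reaches pos
lemma nth_unused :
    ∀ (l : List (String × Bool)) (j p : Nat) (hj : j < l.length), (l[j]'hj).2 = false →
      (l.take j).countP (fun q => !q.2) = p → (unusedOf l)[p]? = some (l[j]'hj).1 := by
  intro l
  induction l with
  | nil => intro j p hj _ _; simp at hj
  | cons q rest ih =>
    obtain ⟨a, u⟩ := q
    intro j p hj hu hc
    cases j with
    | zero =>
      simp at hu
      subst hu
      have : p = 0 := by simpa using hc.symm
      subst this
      simp [unusedOf]
    | succ j =>
      have hj' : j < rest.length := by simpa using hj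
      have hu' : (rest[j]'hj').2 = false := by simpa using hu
      cases hub : u with
      | true =>
        have hc' : (rest.take j).countP (fun q => !q.2) = p := by
          simpa [hub, List.countP_cons] using hc
        have := ih j p hj' hu' hc'
        simpa [unusedOf, hub] using this
      | false =>
        subst hub
        have hp : 0 < p := by
          simp [List.countP_cons] at hc
          omega
        have hc' : (rest.take j).countP (fun q => !q.2) = p - 1 := by
          simp [List.countP_cons] at hc
          omega
        have := ih j (p - 1) hj' hu' hc'
        have hps : p = (p - 1) + 1 := by omega
        rw [hps]
        simpa [unusedOf] using this

lemma snd_zip_eq_take :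
    ∀ (al : List String) (us : List Bool), (al.zip us).map Prod.snd = us.take al.length := by
  intro al
  induction al with
  | nil => intro us; simp
  | cons a al ih =>
    intro us
    cases us with
    | nil => simp
    | cons u us => simp [ih]

-- ===== VERDICT (by name: the statement is the Claim_ definition above) =====

theorem get_unused_char_at_pos_spec : Claim_equal_get_unused_char_at_pos := by
  intro al pos us _ hpre
  unfold Spec_get_unused_char_at_pos
  -- characterize A
  have hA : get_unused_char_at_pos al pos us
      = if (-1 : Int) < pos then
          ((unusedOf (al.zip us))[(pos - (-1) - 1).toNat]?).getD
            (if al.length ≤ us.length then " " else "!")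
        else (if al.length ≤ us.length then " " else "!") := by
    rw [get_unused_char_at_pos,
      show ((0 : Int) = ((0 : Nat) : Int)) from rfl,
      goA_eq_goZ al us pos al.length 0 (-1) (by omega) (by omega)]
    simp [goZ_eq]
  rw [hA]
  rw [get_unused_char_at_pos_alt]
  simp only [PySem.List.slice_to_natCast]
  set flags := us.take al.length with hflags
  have hlenf : flags.length = min al.length us.length := by simp [hflags]
  have hsnd : (al.zip us).map Prod.snd = flags := snd_zip_eq_take al us
  have hzlen : (al.zip us).length = flags.length := by
    have := congrArg List.length hsnd
    simpa using this
  have hcount : ∀ j : Nat, (((al.zip us).take j).countP (fun q => !q.2) : Int) = cntU flags j := by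
    intro j
    unfold cntU
    congr 1
    rw [← hsnd, ← List.map_take, List.countP_map]
    rfl
  have hulen : (unusedOf (al.zip us)).length = (cntU flags flags.length).toNat := by
    unfold unusedOf
    rw [List.length_map, ← List.countP_eq_length_filter]
    have := hcount (al.zip us).length
    rw [List.take_of_length_le (le_refl _), hzlen] at this
    omega
  rw [pref_last]
  simp only [Option.getD_some]
  by_cases hneg : pos < 0
  · rw [if_pos (Or.inl hneg), if_neg (by omega : ¬ (-1 : Int) < pos)]
    have hd : al.length ≤ us.length := by
      rcases hpre with h | h
      · exact h
      · omega
    rw [if_pos hd]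
  · have hposn : (0 : Int) ≤ pos := by omega
    by_cases htot : cntU flags flags.length ≤ pos
    · -- not found: both return " " (Pre_ forces used long enough)
      rw [if_pos (Or.inr htot), if_pos (by omega : (-1 : Int) < pos)]
      have hd : al.length ≤ us.length := by
        rcases hpre with h | h
        · exact h
        · by_contra hlen
          have hfe : flags = us := by
            rw [hflags, List.take_of_length_le (by omega)]
          have : cntU flags flags.length = (us.countP (fun b => !b) : Int) := by
            rw [hfe]; unfold cntU; rw [List.take_of_length_le (le_refl _)]
          omega
      rw [if_pos hd]
      rw [List.getElem?_eq_none (by omega)]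
      rfl
    · -- found: both return alphabet at the located index
      push_neg at htot
      have hn1 : 1 ≤ flags.length := by
        by_contra hn
        have : flags.length = 0 := by omega
        rw [this] at htot
        unfold cntU at htot
        simp at htot
        omega
      have hbs := bsearch_spec flags pos (flags.length) 0 ((flags.length : Int) - 1)
        (by omega) (by omega) (by omega) (by omega)
        (by unfold cntU; simp; exact hposn)
        (by rw [show ((flags.length : Int) - 1).toNat + 1 = flags.length by omega]; exact htot)
      set r := bsearchB (flags.foldl prefStep [(0 : Int)]) pos 0 ((flags.length : Int) - 1) with hr
      obtain ⟨hr0, hrh, hrle, hrlt⟩ := hbs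
      have hjlt : r.toNat < flags.length := by omega
      have hstep := cntU_succ flags r.toNat hjlt
      have hflag : flags[r.toNat] = false := by
        cases hfb : flags[r.toNat] with
        | false => rfl
        | true => rw [hfb] at hstep; simp at hstep; omega
      have hcr : cntU flags r.toNat = pos := by
        rw [hflag] at hstep; simp at hstep; omega
      -- A's side via nth_unused
      have halj : r.toNat < al.length := by omega
      have husj : r.toNat < us.length := by omega
      have hus : us[r.toNat] = false := by
        have ht : flags[r.toNat] = us[r.toNat] := by
          simp [hflags]
        rw [← ht]
        exact hflag
      have hjz : r.toNat < (al.zip us).length := by omega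
      have hz2 : ((al.zip us)[r.toNat]'hjz).2 = false := by
        rw [List.getElem_zip]
        exact hus
      have hcz : ((al.zip us).take r.toNat).countP (fun q => !q.2) = pos.toNat := by
        have := hcount r.toNat
        omega
      have hnth := nth_unused (al.zip us) r.toNat pos.toNat hjz hz2 hcz
      rw [if_neg (by omega : ¬ (pos < 0 ∨ cntU flags flags.length ≤ pos))]
      rw [if_pos (by omega : (-1 : Int) < pos)]
      rw [show (pos - (-1) - 1).toNat = pos.toNat by omega, hnth]
      have hz1 : ((al.zip us)[r.toNat]'hjz).1 = al[r.toNat] := by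
        rw [List.getElem_zip]
      have hgal : PySem.List.pyGet? al r = some al[r.toNat] := by
        rw [PySem.List.pyGet?_of_nonneg _ hr0, List.getElem?_eq_getElem (by omega)]
      rw [hgal]
      simp [hz1]
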